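-- pv_equiv track=rewrite | github.com/chaudha4/python-arithmetic-arranger.py | adventofcode/13-transparent-origami.py | foldPaperUsingSetComprehension
-- ===== SOURCE A (Python) =====
-- def foldPaperUsingSetComprehension(coordinates, folds):
--
--     for fold in folds:
--         if fold[0] == "x": # fold up along the horizontal line
--
--             # Using Comprenhension allows updating set while iterating it. This was not possible
--             # with the previos method.
--             coordinates = {
--                 (
--                     x if x < fold[1] else fold[1] - (x - fold[1]),
--                     y,
--                 )
--                 for x, y in coordinates
--             }
--
--         else: # fold left along the vertical line
--
--             coordinates = {
--                 (
--                     x,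
--                     y if y < fold[1] else fold[1] - (y - fold[1]),
--                 )
--                 for x, y in coordinates
--             }
--
--     return coordinates
-- ===== SOURCE B (Python) =====
-- def foldPaperUsingSetComprehension(coordinates, folds):
--     # One pass: folds act independently on x and y, so collect the fold
--     # lines per axis, run each point through its axis lines once, and
--     # build the output set a single time (instead of one set per fold).
--     xlines = [v for a, v in folds if a == "x"]
--     ylines = [v for a, v in folds if a != "x"]
--
--     def reflect(t, lines):
--         for a in lines:
--             if t >= a:
--                 t = 2 * a - t
--         return t
--
--     return {(reflect(x, xlines), reflect(y, ylines)) for x, y in coordinates}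
-- ===== Notes on version B (the rewrite author's own statement) =====
-- stated objective: faster
-- what changed: Instead of rebuilding the whole point set once per fold, B splits the fold lines by axis and transforms each point once through its x-lines and y-lines, building the output set in a single pass.
import Mathlib
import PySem

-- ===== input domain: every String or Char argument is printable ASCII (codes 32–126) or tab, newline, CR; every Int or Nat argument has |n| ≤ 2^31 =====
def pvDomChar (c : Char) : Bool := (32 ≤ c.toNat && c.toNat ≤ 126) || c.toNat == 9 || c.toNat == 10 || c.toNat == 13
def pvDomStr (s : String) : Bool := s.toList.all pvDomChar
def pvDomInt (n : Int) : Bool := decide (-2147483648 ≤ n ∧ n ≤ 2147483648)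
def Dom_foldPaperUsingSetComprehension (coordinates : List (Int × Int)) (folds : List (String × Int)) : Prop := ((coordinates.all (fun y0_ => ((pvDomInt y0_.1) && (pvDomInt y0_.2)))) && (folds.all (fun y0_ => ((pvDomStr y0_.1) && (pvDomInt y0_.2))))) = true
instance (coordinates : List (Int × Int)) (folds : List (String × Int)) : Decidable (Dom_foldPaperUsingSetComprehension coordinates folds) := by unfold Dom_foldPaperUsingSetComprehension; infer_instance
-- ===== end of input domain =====

-- ===== PORT A =====
-- B builds the folded set in one pass (fold lines split per axis, one set construction); A rebuilds the set once per fold.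
-- pvFoldOnce is the body of A's 'for fold in folds' loop.
def pvFoldOnce (cs : List (Int × Int)) (fold : String × Int) : List (Int × Int) :=
  if fold.1 == "x" then
    PySem.Set.ofList (cs.map (fun p => (if p.1 < fold.2 then p.1 else fold.2 - (p.1 - fold.2), p.2)))
  else
    PySem.Set.ofList (cs.map (fun p => (p.1, if p.2 < fold.2 then p.2 else fold.2 - (p.2 - fold.2))))

def foldPaperUsingSetComprehension (coordinates : List (Int × Int)) (folds : List (String × Int)) : List (Int × Int) :=
  folds.foldl pvFoldOnce coordinates

-- ===== PORT B =====
-- Source B's 'reflect': run one value through the fold lines of its axis.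
def pvReflect (t : Int) (lines : List Int) : Int :=
  lines.foldl (fun t a => if t ≥ a then 2 * a - t else t) t

def foldPaperUsingSetComprehension_alt (coordinates : List (Int × Int)) (folds : List (String × Int)) : List (Int × Int) :=
  let xlines := (folds.filter (fun f => f.1 == "x")).map Prod.snd
  let ylines := (folds.filter (fun f => !(f.1 == "x"))).map Prod.snd
  PySem.Set.ofList (coordinates.map (fun p => (pvReflect p.1 xlines, pvReflect p.2 ylines)))

-- ===== PRECONDITION & SPEC =====
-- coordinates is a Python set of points, so per the type convention the list holds distinct elements.
def Pre_foldPaperUsingSetComprehension (coordinates : List (Int × Int)) (folds : List (String × Int)) : Prop :=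
  coordinates.Nodup

instance (coordinates : List (Int × Int)) (folds : List (String × Int)) : Decidable (Pre_foldPaperUsingSetComprehension coordinates folds) := by
  unfold Pre_foldPaperUsingSetComprehension; infer_instance

def pvWitness_foldPaperUsingSetComprehension : (List (Int × Int)) × (List (String × Int)) :=
  ([(0, 5), (3, 2)], [("y", 3)])

def Spec_foldPaperUsingSetComprehension (coordinates : List (Int × Int)) (folds : List (String × Int)) (out : List (Int × Int)) : Prop := out = foldPaperUsingSetComprehension_alt coordinates folds
instance (coordinates : List (Int × Int)) (folds : List (String × Int)) (out : List (Int × Int)) : Decidable (Spec_foldPaperUsingSetComprehension coordinates folds out) := by unfold Spec_foldPaperUsingSetComprehension; infer_instance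

-- ===== CLAIM (what is proved, stated in full; the proofs are below) =====
def Claim_equal_foldPaperUsingSetComprehension : Prop := ∀ (coordinates : List (Int × Int)) (folds : List (String × Int)), Dom_foldPaperUsingSetComprehension coordinates folds → Pre_foldPaperUsingSetComprehension coordinates folds → Spec_foldPaperUsingSetComprehension coordinates folds (foldPaperUsingSetComprehension coordinates folds)

-- ===== LEMMAS AND PROOFS =====

-- the step A applies to one point for one fold
def pvStep (fold : String × Int) (p : Int × Int) : Int × Int :=
  if fold.1 == "x" then (if p.1 < fold.2 then p.1 else fold.2 - (p.1 - fold.2), p.2)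
  else (p.1, if p.2 < fold.2 then p.2 else fold.2 - (p.2 - fold.2))

theorem pvFoldOnce_eq (cs : List (Int × Int)) (fold : String × Int) :
    pvFoldOnce cs fold = PySem.Set.ofList (cs.map (pvStep fold)) := by
  unfold pvFoldOnce pvStep
  by_cases h : (fold.1 == "x") = true <;> simp [h]

-- keep-first dedup of a list with all copies of y removed = discard y after dedup
theorem discard_ofList {α : Type} [BEq α] [LawfulBEq α] (m : List α) (y : α) :
    (PySem.Set.ofList m).discard y = PySem.Set.ofList (m.filter (fun z => !(z == y))) := by
  induction m with
  | nil => rfl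
  | cons z m ih =>
    by_cases h : z = y
    · subst h
      rw [PySem.Set.ofList_cons]
      have h1 : PySem.Set.discard (z :: (PySem.Set.ofList m).discard z) z
          = PySem.Set.discard ((PySem.Set.ofList m).discard z) z := by
        simp [PySem.Set.discard]
      have h2 : PySem.Set.discard ((PySem.Set.ofList m).discard z) z
          = (PySem.Set.ofList m).discard z := by
        simp [PySem.Set.discard, List.filter_filter]
      rw [h1, h2, ih]
      congr 1
      simp
    · have hz : (z == y) = false := by simp [h]
      have hR : List.filter (fun a => !(a == y)) (z :: m)
          = z :: List.filter (fun a => !(a == y)) m := by simp [hz]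
      rw [PySem.Set.ofList_cons, hR, PySem.Set.ofList_cons, ← ih]
      simp only [PySem.Set.discard, List.filter_cons, hz, Bool.not_false, if_true,
        List.filter_filter]
      · congr 1
        exact List.filter_congr (fun a _ => Bool.and_comm _ _)

-- discarding the image of x after mapping ignores whether x was discarded before mapping
theorem ofList_map_filter_discard {α β : Type} [BEq α] [LawfulBEq α] [BEq β] [LawfulBEq β]
    (f : α → β) (s : List α) (x : α) :
    (PySem.Set.ofList ((s.filter (fun z => !(z == x))).map f)).discard (f x)
      = (PySem.Set.ofList (s.map f)).discard (f x) := by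
  rw [discard_ofList, discard_ofList, List.filter_map, List.filter_map, List.filter_filter]
  congr 2
  refine List.filter_congr (fun a _ => ?_)
  by_cases hfa : (f a == f x) = true
  · simp [Function.comp, hfa]
  · have hax : (a == x) = false := by
      by_cases hx : a = x
      · exact absurd (by simp [hx]) hfa
      · simp [hx]
    simp [Function.comp, hfa, hax]

-- keep-first dedup commutes with mapping then dedup
theorem ofList_map_ofList {α β : Type} [BEq α] [LawfulBEq α] [BEq β] [LawfulBEq β]
    (f : α → β) (l : List α) :
    PySem.Set.ofList ((PySem.Set.ofList l).map f) = PySem.Set.ofList (l.map f) := by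
  induction l with
  | nil => rfl
  | cons x t ih =>
    rw [PySem.Set.ofList_cons, List.map_cons, List.map_cons,
      PySem.Set.ofList_cons, PySem.Set.ofList_cons]
    congr 1
    rw [← ih]
    exact ofList_map_filter_discard f (PySem.Set.ofList t) x

-- A's loop = one dedup of the per-point composition of all fold steps
theorem foldl_pvFoldOnce (folds : List (String × Int)) :
    ∀ cs : List (Int × Int), folds ≠ [] →
    folds.foldl pvFoldOnce cs
      = PySem.Set.ofList (cs.map (fun p => folds.foldl (fun q fold => pvStep fold q) p)) := by
  induction folds with
  | nil => intro cs h; exact absurd rfl h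
  | cons f rest ih =>
    intro cs _
    rw [List.foldl_cons, pvFoldOnce_eq]
    cases rest with
    | nil => simp
    | cons g r =>
      rw [ih _ (by simp), ofList_map_ofList, List.map_map]
      rfl

-- the composition of the fold steps acts per axis
theorem pvStep_split (folds : List (String × Int)) :
    ∀ p : Int × Int,
    folds.foldl (fun q fold => pvStep fold q) p
      = (pvReflect p.1 ((folds.filter (fun f => f.1 == "x")).map Prod.snd),
         pvReflect p.2 ((folds.filter (fun f => !(f.1 == "x"))).map Prod.snd)) := by
  induction folds with
  | nil => intro p; simp [pvReflect]
  | cons f rest ih =>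
    intro p
    rw [List.foldl_cons, ih]
    by_cases h : (f.1 == "x") = true
    · have hstep : pvStep f p = ((if f.2 ≤ p.1 then 2 * f.2 - p.1 else p.1), p.2) := by
        simp only [pvStep, if_pos h]
        congr 1
        split_ifs <;> omega
      rw [hstep]
      simp [h, pvReflect]
    · have hstep : pvStep f p = (p.1, (if f.2 ≤ p.2 then 2 * f.2 - p.2 else p.2)) := by
        simp only [pvStep, if_neg h]
        congr 1
        split_ifs <;> omega
      rw [hstep]
      simp [h, pvReflect]

-- ===== VERDICT (by name: the statement is the Claim_ definition above) =====
theorem foldPaperUsingSetComprehension_spec : Claim_equal_foldPaperUsingSetComprehension := by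
  intro coords folds _ hpre
  unfold Spec_foldPaperUsingSetComprehension
  unfold foldPaperUsingSetComprehension foldPaperUsingSetComprehension_alt
  cases folds with
  | nil =>
    simp only [List.foldl_nil, List.filter_nil, List.map_nil]
    have h : coords.map (fun p => (pvReflect p.1 ([] : List Int), pvReflect p.2 ([] : List Int))) = coords := by
      simp [pvReflect]
    rw [h, PySem.Set.ofList_eq_self_of_nodup _ hpre]
  | cons f rest =>
    rw [foldl_pvFoldOnce _ _ (by simp)]
    congr 1
    refine List.map_congr_left (fun p _ => ?_)
    rw [pvStep_split]
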